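-- pv_equiv track=rewrite | github.com/dosilt/Programmers-Python-dosilt | Level1/체육복.py | solution
-- ===== SOURCE A (Python) =====
-- def solution(n, lost, reserve):
--     remain = sorted(list(set(reserve) - set(lost)))
--     true_lost = sorted(list(set(lost) - set(reserve)))
--
--     check = 0
--     for l in true_lost:
--         if l-1 in remain:
--             remain.remove(l-1)
--             check += 1
--         elif l+1 in remain:
--             remain.remove(l+1)
--             check += 1
--
--     return n - len(true_lost) + check
-- ===== SOURCE B (Python) =====
-- def solution(n, lost, reserve):
--     ls, rs = set(lost), set(reserve)
--     true_lost = sorted(ls - rs)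
--     remain = sorted(rs - ls)
--     check = 0
--     i = 0
--     m = len(remain)
--     for l in true_lost:
--         while i < m and remain[i] < l - 1:
--             i += 1
--         if i < m and (remain[i] == l - 1 or remain[i] == l + 1):
--             check += 1
--             i += 1
--     return n - len(true_lost) + check
-- ===== Notes on version B (the rewrite author's own statement) =====
-- stated objective: faster
-- what changed: Replaces the per-lost-student linear membership scan and list.remove over the remain list with a single two-pointer merge sweep over the two sorted set-difference lists.
import Mathlib
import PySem

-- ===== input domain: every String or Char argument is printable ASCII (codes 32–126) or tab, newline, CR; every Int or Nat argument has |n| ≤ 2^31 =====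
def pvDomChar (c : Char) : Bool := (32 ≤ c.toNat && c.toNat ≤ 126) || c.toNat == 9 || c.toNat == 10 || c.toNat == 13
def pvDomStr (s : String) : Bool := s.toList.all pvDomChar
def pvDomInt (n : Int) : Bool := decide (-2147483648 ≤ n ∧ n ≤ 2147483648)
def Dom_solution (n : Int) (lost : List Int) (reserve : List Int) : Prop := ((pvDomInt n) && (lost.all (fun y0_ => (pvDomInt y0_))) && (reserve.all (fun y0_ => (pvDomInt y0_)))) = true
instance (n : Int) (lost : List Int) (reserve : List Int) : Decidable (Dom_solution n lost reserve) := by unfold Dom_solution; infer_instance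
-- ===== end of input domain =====

-- B replaces A's per-student membership scan + list.remove with a two-pointer merge
-- sweep over the two sorted set-difference lists (measurably faster on large inputs).


-- ===== PORT A =====
-- the 'for l in true_lost' loop, state (remain, check)
def solLoopA : List Int → List Int → Int → (List Int × Int)
  | [], remain, check => (remain, check)
  | l :: ls, remain, check =>
      if (l - 1) ∈ remain then
        solLoopA ls ((PySem.List.remove? remain (l - 1)).getD remain) (check + 1)
      else if (l + 1) ∈ remain then
        solLoopA ls ((PySem.List.remove? remain (l + 1)).getD remain) (check + 1)
      else
        solLoopA ls remain check

def solution (n : Int) (lost : List Int) (reserve : List Int) : Int :=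
  let remain := PySem.List.sorted (PySem.Set.diff (PySem.Set.ofList reserve) (PySem.Set.ofList lost)) (fun x => x) false
  let true_lost := PySem.List.sorted (PySem.Set.diff (PySem.Set.ofList lost) (PySem.Set.ofList reserve)) (fun x => x) false
  let st := solLoopA true_lost remain 0
  n - true_lost.length + st.2

-- ===== PORT B =====
-- the 'while i < m and remain[i] < l - 1: i += 1' advance of the pointer:
-- the suffix remain[i:] after advancing (exact: remain[i:] determines all later reads)
def skipB (l : Int) : List Int → List Int
  | [] => []
  | r :: rs => if r < l - 1 then skipB l rs else r :: rs

-- the 'for l in true_lost' loop of B, state (remain-suffix, check)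
def solLoopB : List Int → List Int → Int → (List Int × Int)
  | [], rem, check => (rem, check)
  | l :: ls, rem, check =>
      match skipB l rem with
      | [] => solLoopB ls [] check
      | r :: rs =>
          if r = l - 1 ∨ r = l + 1 then solLoopB ls rs (check + 1)
          else solLoopB ls (r :: rs) check

def solution_alt (n : Int) (lost : List Int) (reserve : List Int) : Int :=
  let true_lost := PySem.List.sorted (PySem.Set.diff (PySem.Set.ofList lost) (PySem.Set.ofList reserve)) (fun x => x) false
  let remain := PySem.List.sorted (PySem.Set.diff (PySem.Set.ofList reserve) (PySem.Set.ofList lost)) (fun x => x) false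
  let st := solLoopB true_lost remain 0
  n - true_lost.length + st.2

-- ===== PRECONDITION & SPEC =====
def Spec_solution (n : Int) (lost : List Int) (reserve : List Int) (out : Int) : Prop := out = solution_alt n lost reserve
instance (n : Int) (lost : List Int) (reserve : List Int) (out : Int) : Decidable (Spec_solution n lost reserve out) := by unfold Spec_solution; infer_instance

-- ===== CLAIM (what is proved, stated in full; the proofs are below) =====
def Claim_equal_solution : Prop := ∀ (n : Int) (lost : List Int) (reserve : List Int), Dom_solution n lost reserve → Spec_solution n lost reserve (solution n lost reserve)

-- ===== LEMMAS AND PROOFS =====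

-- skipB yields a sublist (in fact a suffix) of its argument
theorem skipB_head_ge (l : Int) : ∀ (R : List Int) (r : Int) (rs : List Int),
    skipB l R = r :: rs → ¬ r < l - 1 := by
  intro R
  induction R with
  | nil => intro r rs h; simp [skipB] at h
  | cons a as ih =>
      intro r rs h
      simp only [skipB] at h
      split at h
      · exact ih r rs h
      · rename_i hna
        obtain ⟨he, _⟩ := List.cons.injEq .. ▸ h
        exact he ▸ hna

theorem skipB_sublist (l : Int) : ∀ (R : List Int), (skipB l R).Sublist R := by
  intro R
  induction R with
  | nil => simp [skipB]
  | cons r rs ih =>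
      simp only [skipB]
      split
      · exact ih.trans (List.sublist_cons_self r rs)
      · exact List.Sublist.refl _

-- an element r smaller than l'-1 for every l' in L is never matched nor removed by A's loop:
-- only the check counter is claimed equal (the remain states differ by the r prefix)
theorem loopA_drop_small (r : Int) :
    ∀ (L : List Int), ∀ (rs : List Int) (c : Int), (∀ l' ∈ L, r < l' - 1) →
      (solLoopA L (r :: rs) c).2 = (solLoopA L rs c).2 := by
  intro L
  induction L with
  | nil => intro rs c _; rfl
  | cons l ls ih =>
      intro rs c h
      have hr : r < l - 1 := h l (by simp)
      have hls : ∀ l' ∈ ls, r < l' - 1 := fun l' hl' => h l' (by simp [hl'])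
      have hne1 : r ≠ l - 1 := by omega
      have hne2 : r ≠ l + 1 := by omega
      simp only [solLoopA, List.mem_cons]
      by_cases h1 : (l - 1) ∈ rs
      · have hm : l - 1 = r ∨ l - 1 ∈ rs := Or.inr h1
        rw [if_pos hm, if_pos h1]
        have hrm : PySem.List.remove? (r :: rs) (l - 1) = (PySem.List.remove? rs (l - 1)).map (r :: ·) :=
          PySem.List.remove?_cons_of_ne rs hne1
        have hsome : PySem.List.remove? rs (l - 1) = some (rs.erase (l - 1)) :=
          PySem.List.remove?_eq_some_erase rs _ h1
        rw [hrm, hsome]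
        simpa using ih (rs.erase (l - 1)) (c + 1) hls
      · have hm : ¬ (l - 1 = r ∨ l - 1 ∈ rs) := by
          rintro (he | he)
          · exact hne1 he.symm
          · exact h1 he
        rw [if_neg hm, if_neg h1]
        by_cases h2 : (l + 1) ∈ rs
        · have hm2 : l + 1 = r ∨ l + 1 ∈ rs := Or.inr h2
          rw [if_pos hm2, if_pos h2]
          have hrm : PySem.List.remove? (r :: rs) (l + 1) = (PySem.List.remove? rs (l + 1)).map (r :: ·) :=
            PySem.List.remove?_cons_of_ne rs hne2
          have hsome : PySem.List.remove? rs (l + 1) = some (rs.erase (l + 1)) :=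
            PySem.List.remove?_eq_some_erase rs _ h2
          rw [hrm, hsome]
          simpa using ih (rs.erase (l + 1)) (c + 1) hls
        · have hm2 : ¬ (l + 1 = r ∨ l + 1 ∈ rs) := by
            rintro (he | he)
            · exact hne2 he.symm
            · exact h2 he
          rw [if_neg hm2, if_neg h2]
          exact ih rs c hls

-- dropping the whole < l-1 prefix (what B's pointer advance does) does not change A's counter
theorem loopA_skipB (l : Int) :
    ∀ (R : List Int) (L : List Int) (c : Int), (∀ l' ∈ L, l ≤ l') →
      (solLoopA L R c).2 = (solLoopA L (skipB l R) c).2 := by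
  intro R
  induction R with
  | nil => intro L c _; rfl
  | cons r rs ih =>
      intro L c hL
      simp only [skipB]
      split
      · rename_i hr
        have : ∀ l' ∈ L, r < l' - 1 := fun l' hl' => by have := hL l' hl'; omega
        rw [loopA_drop_small r L rs c this]
        exact ih L c hL
      · rfl

-- MAIN INVARIANT: on strictly sorted, disjoint lists the two loops count the same
theorem loop_eq :
    ∀ (L R : List Int) (c : Int),
      L.Pairwise (· < ·) → R.Pairwise (· < ·) → (∀ x ∈ L, x ∉ R) →
      (solLoopA L R c).2 = (solLoopB L R c).2 := by
  intro L
  induction L with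
  | nil => intro R c _ _ _; rfl
  | cons l ls ih =>
      intro R c hL hR hD
      have hLls : ls.Pairwise (· < ·) := hL.tail
      have hlle : ∀ l' ∈ l :: ls, l ≤ l' := by
        intro l' hl'
        rcases List.mem_cons.mp hl' with he | hm
        · omega
        · exact le_of_lt (List.rel_of_pairwise_cons hL hm)
      have hskip := loopA_skipB l R (l :: ls) c hlle
      have hsub : (skipB l R).Sublist R := skipB_sublist l R
      have hRS : (skipB l R).Pairwise (· < ·) := hR.sublist hsub
      have hDS : ∀ x ∈ l :: ls, x ∉ skipB l R := fun x hx hxs => hD x hx (hsub.mem hxs)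
      rw [hskip]
      cases hS : skipB l R with
      | nil =>
          simp only [solLoopB, hS]
          have hA : solLoopA (l :: ls) [] c = solLoopA ls [] c := by simp [solLoopA]
          rw [hA]
          exact ih [] c hLls (by simp) (by simp)
      | cons r rs =>
          -- r ≥ l - 1 : skipB stopped here
          have hrge : ¬ r < l - 1 := skipB_head_ge l R r rs hS
          have hrneql : r ≠ l := fun he => hDS l (by simp) (by simp [hS, he])
          have hallge : ∀ x ∈ r :: rs, r ≤ x := by
            intro x hx
            rcases List.mem_cons.mp hx with he | hm
            · omega
            · exact le_of_lt (List.rel_of_pairwise_cons (hS ▸ hRS) hm)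
          have hRS' : (r :: rs).Pairwise (· < ·) := hS ▸ hRS
          have hDls : ∀ x ∈ ls, x ∉ rs := fun x hx hxs =>
            hDS x (by simp [hx]) (by simp [hS, hxs])
          simp only [solLoopB, hS]
          by_cases h1 : r = l - 1
          · -- A finds l-1 at the head
            have hmem : (l - 1) ∈ r :: rs := by simp [h1]
            simp only [solLoopA, if_pos hmem]
            have : PySem.List.remove? (r :: rs) (l - 1) = some rs := by
              rw [← h1]; exact PySem.List.remove?_cons_self r rs
            rw [this]
            simp only [Option.getD_some]
            rw [if_pos (Or.inl h1)]
            exact ih rs (c + 1) hLls hRS'.tail hDls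
          · by_cases h2 : r = l + 1
            · -- l-1 ∉ r :: rs since every element ≥ r = l+1 > l-1
              have hnm1 : (l - 1) ∉ r :: rs := fun hm => by
                have := hallge _ hm; omega
              have hmem : (l + 1) ∈ r :: rs := by simp [h2]
              simp only [solLoopA, if_neg hnm1, if_pos hmem]
              have : PySem.List.remove? (r :: rs) (l + 1) = some rs := by
                rw [← h2]; exact PySem.List.remove?_cons_self r rs
              rw [this]
              simp only [Option.getD_some]
              rw [if_pos (Or.inr h2)]
              exact ih rs (c + 1) hLls hRS'.tail hDls
            · -- r ≥ l + 2: neither l-1 nor l+1 occurs in r :: rs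
              have hr2 : l + 2 ≤ r := by omega
              have hnm1 : (l - 1) ∉ r :: rs := fun hm => by
                have := hallge _ hm; omega
              have hnm2 : (l + 1) ∉ r :: rs := fun hm => by
                have := hallge _ hm; omega
              simp only [solLoopA, if_neg hnm1, if_neg hnm2]
              rw [if_neg (by rintro (he | he) <;> omega)]
              exact ih (r :: rs) c hLls hRS'
                (fun x hx hxm => hD x (by simp [hx]) (hsub.mem (by rw [hS]; exact hxm)))

-- strictly increasing order of sorted set-difference lists
theorem sorted_diff_lt (xs ys : List Int) :
    (PySem.List.sorted (PySem.Set.diff (PySem.Set.ofList xs) (PySem.Set.ofList ys)) (fun x => x) false).Pairwise (· < ·) := by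
  have hnd : (PySem.Set.diff (PySem.Set.ofList xs) (PySem.Set.ofList ys)).Nodup :=
    PySem.Set.nodup_diff _ _ (PySem.Set.nodup_ofList xs)
  have hperm := PySem.List.sorted_perm (xs := PySem.Set.diff (PySem.Set.ofList xs) (PySem.Set.ofList ys)) (key := fun x => x) (rev := false)
  have hnd' : (PySem.List.sorted (PySem.Set.diff (PySem.Set.ofList xs) (PySem.Set.ofList ys)) (fun x => x) false).Nodup :=
    hperm.nodup_iff.mpr hnd
  have hle := PySem.List.sorted_pairwise (xs := PySem.Set.diff (PySem.Set.ofList xs) (PySem.Set.ofList ys)) (key := fun x => x)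
  exact (hle.and hnd').imp (fun ⟨h1, h2⟩ => lt_of_le_of_ne h1 h2)

-- ===== VERDICT (by name: the statement is the Claim_ definition above) =====
theorem solution_spec : Claim_equal_solution := by
  intro n lost reserve _
  unfold Spec_solution solution solution_alt
  have hL := sorted_diff_lt lost reserve
  have hR := sorted_diff_lt reserve lost
  have hD : ∀ x ∈ PySem.List.sorted (PySem.Set.diff (PySem.Set.ofList lost) (PySem.Set.ofList reserve)) (fun x => x) false,
      x ∉ PySem.List.sorted (PySem.Set.diff (PySem.Set.ofList reserve) (PySem.Set.ofList lost)) (fun x => x) false := by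
    intro x hx hx'
    rw [PySem.List.mem_sorted] at hx hx'
    have h1 := (PySem.Set.mem_diff _ _ _).mp hx
    have h2 := (PySem.Set.mem_diff _ _ _).mp hx'
    exact h1.2 h2.1
  simp only []
  rw [loop_eq _ _ 0 hL hR hD]
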